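-- pv_equiv track=rewrite | github.com/CherylYul/algorithm | sort/d-ary-heap.py | d_ary_max_heapify
-- ===== SOURCE A (Python) =====
-- def d_ary_child(d, i, j):
--     return int(d * i + j)  # d(i-1) + j + 1
--
-- def d_ary_max_heapify(d, a, i):
--     largest = i
--     for k in range(d):
--         child = d_ary_child(d, i, k + 1)
--         if child < len(a) and a[child] > a[largest]:
--             largest = child
--     if largest != i:
--         a[i], a[largest] = a[largest], a[i]
--         d_ary_max_heapify(d, a, largest)
--     return a
-- ===== SOURCE B (Python) =====
-- def d_ary_max_heapify(d, a, i):
--     cur = i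
--     while True:
--         lo = d * cur + 1
--         kids = a[lo:lo + d] if d > 0 else []
--         if not kids:
--             return a
--         m = max(kids)
--         if m <= a[cur]:
--             return a
--         j = lo + kids.index(m)
--         a[cur], a[j] = a[j], a[cur]
--         cur = j
-- ===== Notes on version B (the rewrite author's own statement) =====
-- stated objective: alternative
-- what changed: A's tail recursion becomes a while-loop, and A's explicit per-child scan (range(d) with an index-formula helper and per-element comparisons) is replaced by slicing the child block out of the list and using max()/list.index() to locate the first maximal child.
-- outside the precondition, e.g. on d_ary_max_heapify(1, [1, 2], -2): A returns [2, 1], B returns [1, 2]; on d_ary_max_heapify(2, [4, 5], -2): A raises IndexError, B returns [4, 5]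
import Mathlib
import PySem

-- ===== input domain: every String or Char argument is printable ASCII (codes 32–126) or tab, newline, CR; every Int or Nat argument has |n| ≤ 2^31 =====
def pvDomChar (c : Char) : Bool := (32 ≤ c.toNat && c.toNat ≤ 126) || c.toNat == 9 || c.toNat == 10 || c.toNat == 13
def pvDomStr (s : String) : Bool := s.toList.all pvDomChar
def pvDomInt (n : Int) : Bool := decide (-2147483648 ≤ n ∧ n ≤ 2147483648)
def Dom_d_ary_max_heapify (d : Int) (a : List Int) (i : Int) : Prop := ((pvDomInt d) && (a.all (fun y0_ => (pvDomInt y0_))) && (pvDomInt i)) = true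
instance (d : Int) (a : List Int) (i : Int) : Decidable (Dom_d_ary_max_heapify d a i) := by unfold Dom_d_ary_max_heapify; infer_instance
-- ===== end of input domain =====

-- B replaces A's recursion by an iterative sift-down whose child scan is a slice + max + index
-- (a different decomposition); both Pythons mutate `a` in place the same way, the theorems are
-- about the returned list.

-- ===== PORT A =====
-- helper `d_ary_child` of the Python module
def d_ary_child (d i j : Int) : Int := d * i + j

-- a[x], a[y] = a[y], a[x]; exact for in-range indices (the only ones reached inside Pre_)
def pvSwap (a : List Int) (x y : Int) : List Int :=
  PySem.List.pySetD (PySem.List.pySetD a x (PySem.List.pyGetD a y 0)) y (PySem.List.pyGetD a x 0)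

-- the `for k in range(d)` loop of A; pyGetD is exact here: inside Pre_ every access is in range
def pvScanChildren (d : Int) (a : List Int) (i : Int) : Int :=
  (PySem.List.pyRange 0 d 1).foldl
    (fun largest k =>
      let child := d_ary_child d i (k + 1)
      if child < (a.length : Int) ∧ PySem.List.pyGetD a child 0 > PySem.List.pyGetD a largest 0
      then child else largest) i

-- fuel makes A's recursion total; inside Pre_ the index strictly increases and stays below
-- a.length, so fuel = a.length + 1 (the wrapper's choice) is never exhausted.
def d_ary_max_heapify_go (fuel : Nat) (d : Int) (a : List Int) (i : Int) : List Int :=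
  let largest := pvScanChildren d a i
  if largest ≠ i then
    match fuel with
    | 0 => pvSwap a i largest
    | f + 1 => d_ary_max_heapify_go f d (pvSwap a i largest) largest
  else a
termination_by fuel

def d_ary_max_heapify (d : Int) (a : List Int) (i : Int) : List Int :=
  d_ary_max_heapify_go (a.length + 1) d a i

-- ===== PORT B =====
-- Source B's `while True` loop as fuel recursion (same fuel bound, never exhausted inside Pre_);
-- pyGetD a cur is exact: it is only reached when kids ≠ [], which forces 0 ≤ cur < a.length.
def d_ary_max_heapify_alt_go (fuel : Nat) (d : Int) (a : List Int) (cur : Int) : List Int :=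
  let lo := d * cur + 1
  let kids := if 0 < d then PySem.List.slice a (some lo) (some (lo + d)) else []
  match PySem.List.max? kids (fun x => x) with
  | none => a
  | some m =>
    if m ≤ PySem.List.pyGetD a cur 0 then a
    else
      let j := lo + (((PySem.List.index? kids m).getD 0 : Nat) : Int)
      match fuel with
      | 0 => pvSwap a cur j
      | f + 1 => d_ary_max_heapify_alt_go f d (pvSwap a cur j) j
termination_by fuel

def d_ary_max_heapify_alt (d : Int) (a : List Int) (i : Int) : List Int :=
  d_ary_max_heapify_alt_go (a.length + 1) d a i

-- ===== PRECONDITION & SPEC =====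
-- Pre_ excludes only a negative start index i combined with d ≥ 1: there A either raises
-- IndexError or returns a value via Python's negative-index wraparound, and which of the two
-- happens depends on the list's values, not on any closed-form condition on the input.
def Pre_d_ary_max_heapify (d : Int) (_a : List Int) (i : Int) : Prop := 0 ≤ i ∨ d ≤ 0
instance (d : Int) (a : List Int) (i : Int) : Decidable (Pre_d_ary_max_heapify d a i) := by unfold Pre_d_ary_max_heapify; infer_instance

def pvWitness_d_ary_max_heapify : Int × List Int × Int := (3, [5, 9, 7, 8], 0)

def Spec_d_ary_max_heapify (d : Int) (a : List Int) (i : Int) (out : List Int) : Prop := out = d_ary_max_heapify_alt d a i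
instance (d : Int) (a : List Int) (i : Int) (out : List Int) : Decidable (Spec_d_ary_max_heapify d a i out) := by unfold Spec_d_ary_max_heapify; infer_instance

-- ===== CLAIM (what is proved, stated in full; the proofs are below) =====
def Claim_equal_d_ary_max_heapify : Prop := ∀ (d : Int) (a : List Int) (i : Int), Dom_d_ary_max_heapify d a i → Pre_d_ary_max_heapify d a i → Spec_d_ary_max_heapify d a i (d_ary_max_heapify d a i)

-- ===== LEMMAS AND PROOFS =====

-- the children of node i, as the list B slices out
def pvKids (d : Int) (a : List Int) (i : Int) : List Int :=
  (a.drop (d * i + 1).toNat).take d.toNat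

-- A's scan, cut off after the first t children
def pvFoldK (d : Int) (a : List Int) (i : Int) (t : Nat) : Int :=
  (PySem.List.pyRange 0 (t : Int) 1).foldl
    (fun largest k =>
      let child := d_ary_child d i (k + 1)
      if child < (a.length : Int) ∧ PySem.List.pyGetD a child 0 > PySem.List.pyGetD a largest 0
      then child else largest) i

-- running best (value, index-within-kids) with strict-> update, position counter p
def pvBest : List Int → Int → Option Nat → Nat → Int × Option Nat
  | [], b, bj, _ => (b, bj)
  | x :: t, b, bj, p => if b < x then pvBest t x (some p) (p + 1) else pvBest t b bj (p + 1)

def pvEnc (i lo : Int) (r : Int × Option Nat) : Int :=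
  match r.2 with
  | none => i
  | some p => lo + (p : Int)

theorem pvBest_nil (b : Int) (bj : Option Nat) (p : Nat) : pvBest [] b bj p = (b, bj) := rfl

theorem pvBest_cons (x : Int) (t : List Int) (b : Int) (bj : Option Nat) (p : Nat) :
    pvBest (x :: t) b bj p
      = if b < x then pvBest t x (some p) (p + 1) else pvBest t b bj (p + 1) := rfl

theorem pvBest_append (xs : List Int) (x : Int) : ∀ (b : Int) (bj : Option Nat) (p : Nat),
    pvBest (xs ++ [x]) b bj p =
      (if (pvBest xs b bj p).1 < x then (x, some (p + xs.length)) else pvBest xs b bj p) := by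
  induction xs with
  | nil => intro b bj p; simp [pvBest_nil, List.nil_append, pvBest_cons]
  | cons y t ih =>
    intro b bj p
    rw [List.cons_append, pvBest_cons, pvBest_cons]
    by_cases h : b < y
    · rw [if_pos h, if_pos h, ih]
      simp only [List.length_cons]
      have e : p + 1 + t.length = p + (t.length + 1) := by omega
      rw [e]
    · rw [if_neg h, if_neg h, ih]
      simp only [List.length_cons]
      have e : p + 1 + t.length = p + (t.length + 1) := by omega
      rw [e]

theorem pv_foldl_max_init (u : List Int) : ∀ (x y : Int), u.foldl max (max x y) = max x (u.foldl max y) := by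
  induction u with
  | nil => intro x y; simp
  | cons z u ih => intro x y; simp only [List.foldl]; rw [max_assoc, ih]

theorem pvBest_spec (xs : List Int) : ∀ (b : Int) (bj : Option Nat) (p : Nat),
    pvBest xs b bj p =
      match PySem.List.max? xs (fun x => x) with
      | none => (b, bj)
      | some m => if m ≤ b then (b, bj)
                  else (m, some (p + (PySem.List.index? xs m).getD 0)) := by
  induction xs with
  | nil =>
    intro b bj p
    have h : PySem.List.max? ([] : List Int) (fun x => x) = none := by
      rw [PySem.List.max?_eq_none_iff]
    rw [h, pvBest_nil]
  | cons x t ih =>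
    intro b bj p
    rw [PySem.List.max?_id_cons, pvBest_cons]
    cases t with
    | nil =>
      simp only [List.foldl]
      by_cases h : b < x
      · rw [if_pos h, if_neg (by omega : ¬ x ≤ b), pvBest_nil,
          PySem.List.index?_cons_self]
        simp

      · rw [if_neg h, if_pos (by omega : x ≤ b), pvBest_nil]
    | cons y u =>
      have hmax : PySem.List.max? (y :: u) (fun z => z) = some (u.foldl max y) :=
        PySem.List.max?_id_cons y u
      set mt := u.foldl max y with hmt
      have hfold : (y :: u).foldl max x = max x mt := by
        simp only [List.foldl]; exact pv_foldl_max_init u x y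
      have hmem : mt ∈ y :: u := PySem.List.max?_mem hmax
      obtain ⟨k, hk⟩ := Option.isSome_iff_exists.mp
        ((PySem.List.index?_isSome_iff (xs := y :: u) (v := mt)).2 hmem)
      rw [hfold]
      by_cases h : b < x
      · rw [if_pos h, ih, hmax]
        dsimp only
        by_cases h2 : mt ≤ x
        · rw [if_pos h2, max_eq_left h2, if_neg (by omega : ¬ x ≤ b),
            PySem.List.index?_cons_self]
          simp
        · rw [if_neg h2, max_eq_right (by omega : x ≤ mt), if_neg (by omega : ¬ mt ≤ b)]
          rw [PySem.List.index?_cons_of_ne _ (by omega : x ≠ mt), hk]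
          simp only [Option.map_some, Option.getD_some]
          have e : p + 1 + k = p + (k + 1) := by omega
          rw [e]
      · rw [if_neg h, ih, hmax]
        dsimp only
        by_cases h2 : mt ≤ b
        · rw [if_pos h2, if_pos (by omega : max x mt ≤ b)]
        · rw [if_neg h2, max_eq_right (by omega : x ≤ mt), if_neg (by omega : ¬ mt ≤ b)]
          rw [PySem.List.index?_cons_of_ne _ (by omega : x ≠ mt), hk]
          simp only [Option.map_some, Option.getD_some]
          have e : p + 1 + k = p + (k + 1) := by omega
          rw [e]

theorem pvFoldK_zero (d : Int) (a : List Int) (i : Int) : pvFoldK d a i 0 = i := by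
  simp [pvFoldK, PySem.List.pyRange_one_eq_nil]

theorem pvFoldK_succ (d : Int) (a : List Int) (i : Int) (t : Nat) :
    pvFoldK d a i (t + 1) =
      (if d_ary_child d i ((t : Int) + 1) < (a.length : Int) ∧
          PySem.List.pyGetD a (d_ary_child d i ((t : Int) + 1)) 0 > PySem.List.pyGetD a (pvFoldK d a i t) 0
       then d_ary_child d i ((t : Int) + 1) else pvFoldK d a i t) := by
  unfold pvFoldK
  have h1 : ((t + 1 : Nat) : Int) = (t : Int) + 1 := by push_cast; ring
  rw [h1, PySem.List.pyRange_one_succ_right (Int.natCast_nonneg t), List.foldl_append]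
  rfl

theorem pvScan_inv (d : Int) (a : List Int) (i : Int) (hd : 0 < d) (hi : 0 ≤ i)
    (t : Nat) (ht : t ≤ d.toNat) :
    pvFoldK d a i t
        = pvEnc i (d * i + 1) (pvBest ((pvKids d a i).take t) (PySem.List.pyGetD a i 0) none 0)
      ∧ PySem.List.pyGetD a (pvFoldK d a i t) 0
        = (pvBest ((pvKids d a i).take t) (PySem.List.pyGetD a i 0) none 0).1 := by
  have hdi : (0:Int) ≤ d * i := mul_nonneg hd.le hi
  have hKlen : (pvKids d a i).length = min d.toNat (a.length - (d * i + 1).toNat) := by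
    simp [pvKids, List.length_take, List.length_drop]
  revert ht
  induction t with
  | zero => intro _; constructor <;> simp [pvFoldK_zero, pvBest_nil, pvEnc]
  | succ t ih =>
    intro ht
    obtain ⟨ih1, ih2⟩ := ih (by omega)
    have hchild : d_ary_child d i ((t : Int) + 1) = (d * i + 1) + (t : Int) := by
      unfold d_ary_child; ring
    rw [pvFoldK_succ, hchild]
    by_cases hc : t < (pvKids d a i).length
    · have hlt : (d * i + 1).toNat + t < a.length := by omega
      have hcl : (d * i + 1) + (t : Int) < (a.length : Int) := by omega
      have hgetK : (pvKids d a i)[t]'hc = a[(d * i + 1).toNat + t]'hlt := by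
        simp [pvKids, List.getElem_take, List.getElem_drop]
      have hval : PySem.List.pyGetD a ((d * i + 1) + (t : Int)) 0 = (pvKids d a i)[t]'hc := by
        rw [PySem.List.pyGetD_eq_getElem a 0 (by omega) hcl, hgetK]
        congr 1
        omega
      have htake : (pvKids d a i).take (t + 1) = (pvKids d a i).take t ++ [(pvKids d a i)[t]'hc] := by
        rw [List.take_add_one, List.getElem?_eq_getElem hc]
        rfl
      have htlen : ((pvKids d a i).take t).length = t := by
        simp [List.length_take]; omega
      rw [htake, pvBest_append, htlen]
      by_cases hcmp : (pvBest ((pvKids d a i).take t) (PySem.List.pyGetD a i 0) none 0).1 < (pvKids d a i)[t]'hc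
      · rw [if_pos hcmp,
          if_pos ⟨hcl, by rw [hval, ih2]; exact hcmp⟩]
        constructor
        · simp [pvEnc]
        · rw [hval]
      · rw [if_neg hcmp,
          if_neg (by rw [hval, ih2]; exact fun hh => hcmp hh.2)]
        exact ⟨ih1, ih2⟩
    · have hnc : ¬ ((d * i + 1) + (t : Int) < (a.length : Int)) := by omega
      have htake : (pvKids d a i).take (t + 1) = (pvKids d a i).take t := by
        rw [List.take_of_length_le (by omega), List.take_of_length_le (by omega)]
      rw [htake, if_neg (fun hh => hnc hh.1)]
      exact ⟨ih1, ih2⟩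

theorem pvScan_char (d : Int) (a : List Int) (i : Int) (hd : 0 < d) (hi : 0 ≤ i) :
    pvScanChildren d a i
      = pvEnc i (d * i + 1) (pvBest (pvKids d a i) (PySem.List.pyGetD a i 0) none 0) := by
  have h := (pvScan_inv d a i hd hi d.toNat le_rfl).1
  have hfull : (pvKids d a i).take d.toNat = pvKids d a i :=
    List.take_of_length_le (by simp [pvKids, List.length_take, List.length_drop])
  have hscan : pvScanChildren d a i = pvFoldK d a i d.toNat := by
    unfold pvScanChildren pvFoldK
    rw [Int.toNat_of_nonneg hd.le]
  rw [hscan, h, hfull]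

theorem pvKids_eq_slice (d : Int) (a : List Int) (i : Int) (hd : 0 < d) (hi : 0 ≤ i) :
    PySem.List.slice a (some (d * i + 1)) (some ((d * i + 1) + d)) = pvKids d a i := by
  have hdi : (0:Int) ≤ d * i := mul_nonneg hd.le hi
  rw [PySem.List.slice_toNat a (by omega) (by omega)]
  unfold pvKids
  congr 1
  omega

theorem pv_go_eq_core (fuel : Nat) (d : Int) (a : List Int) (i : Int) (h : 0 ≤ i ∨ d ≤ 0)
    (hrec : ∀ (a' : List Int) (j : Int), 0 ≤ j →
      (match fuel with
       | 0 => a'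
       | f + 1 => d_ary_max_heapify_go f d a' j)
      = (match fuel with
         | 0 => a'
         | f + 1 => d_ary_max_heapify_alt_go f d a' j)) :
    d_ary_max_heapify_go fuel d a i = d_ary_max_heapify_alt_go fuel d a i := by
  by_cases hd : 0 < d
  · have hi : 0 ≤ i := h.resolve_right (by omega)
    have hdi : i ≤ d * i := le_mul_of_one_le_left hi (by omega)
    have hbest := pvBest_spec (pvKids d a i) (PySem.List.pyGetD a i 0) none 0
    cases hmx : PySem.List.max? (pvKids d a i) (fun x => x) with
    | none =>
      rw [hmx] at hbest
      have hb2 : pvBest (pvKids d a i) (PySem.List.pyGetD a i 0) none 0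
          = (PySem.List.pyGetD a i 0, none) := hbest
      have hA : d_ary_max_heapify_go fuel d a i = a := by
        rw [d_ary_max_heapify_go.eq_def]
        dsimp only
        rw [pvScan_char d a i hd hi, hb2, if_neg (fun hh => hh rfl)]
      have hB : d_ary_max_heapify_alt_go fuel d a i = a := by
        rw [d_ary_max_heapify_alt_go.eq_def]
        dsimp only
        rw [if_pos hd, pvKids_eq_slice d a i hd hi, hmx]
      rw [hA, hB]
    | some m =>
      rw [hmx] at hbest
      by_cases hmb : m ≤ PySem.List.pyGetD a i 0
      · have hb2 : pvBest (pvKids d a i) (PySem.List.pyGetD a i 0) none 0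
            = (PySem.List.pyGetD a i 0, none) := by
          rw [hbest]
          show (if m ≤ PySem.List.pyGetD a i 0 then _ else _) = _
          rw [if_pos hmb]
        have hA : d_ary_max_heapify_go fuel d a i = a := by
          rw [d_ary_max_heapify_go.eq_def]
          dsimp only
          rw [pvScan_char d a i hd hi, hb2, if_neg (fun hh => hh rfl)]
        have hB : d_ary_max_heapify_alt_go fuel d a i = a := by
          rw [d_ary_max_heapify_alt_go.eq_def]
          dsimp only
          rw [if_pos hd, pvKids_eq_slice d a i hd hi, hmx]
          show (if m ≤ PySem.List.pyGetD a i 0 then a else _) = _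
          rw [if_pos hmb]
        rw [hA, hB]
      · have hb2 : pvBest (pvKids d a i) (PySem.List.pyGetD a i 0) none 0
            = (m, some ((PySem.List.index? (pvKids d a i) m).getD 0)) := by
          rw [hbest]
          show (if m ≤ PySem.List.pyGetD a i 0 then _ else _) = _
          rw [if_neg hmb]
          simp
        have hc0 : (0:Int) ≤ (((PySem.List.index? (pvKids d a i) m).getD 0 : Nat) : Int) :=
          Int.natCast_nonneg _
        have hJne : pvEnc i (d * i + 1)
            (m, some ((PySem.List.index? (pvKids d a i) m).getD 0)) ≠ i := by
          show d * i + 1 + (((PySem.List.index? (pvKids d a i) m).getD 0 : Nat) : Int) ≠ i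
          omega
        have hA : d_ary_max_heapify_go fuel d a i = (match fuel with
            | 0 => pvSwap a i (d * i + 1 + (((PySem.List.index? (pvKids d a i) m).getD 0 : Nat) : Int))
            | f + 1 => d_ary_max_heapify_go f d
                (pvSwap a i (d * i + 1 + (((PySem.List.index? (pvKids d a i) m).getD 0 : Nat) : Int)))
                (d * i + 1 + (((PySem.List.index? (pvKids d a i) m).getD 0 : Nat) : Int))) := by
          rw [d_ary_max_heapify_go.eq_def]
          dsimp only
          rw [pvScan_char d a i hd hi, hb2, if_pos hJne]
          cases fuel <;> rfl
        have hB : d_ary_max_heapify_alt_go fuel d a i = (match fuel with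
            | 0 => pvSwap a i (d * i + 1 + (((PySem.List.index? (pvKids d a i) m).getD 0 : Nat) : Int))
            | f + 1 => d_ary_max_heapify_alt_go f d
                (pvSwap a i (d * i + 1 + (((PySem.List.index? (pvKids d a i) m).getD 0 : Nat) : Int)))
                (d * i + 1 + (((PySem.List.index? (pvKids d a i) m).getD 0 : Nat) : Int))) := by
          rw [d_ary_max_heapify_alt_go.eq_def]
          dsimp only
          rw [if_pos hd, pvKids_eq_slice d a i hd hi, hmx]
          show (if m ≤ PySem.List.pyGetD a i 0 then a else _) = _
          rw [if_neg hmb]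
          cases fuel <;> rfl
        rw [hA, hB]
        cases fuel with
        | zero => rfl
        | succ f => exact hrec _ _ (by omega)
  · have hd' : d ≤ 0 := by omega
    have hscan : pvScanChildren d a i = i := by
      unfold pvScanChildren
      rw [PySem.List.pyRange_one_eq_nil hd']
      rfl
    have hmx : PySem.List.max? ([] : List Int) (fun x => x) = none := by
      rw [PySem.List.max?_eq_none_iff]
    have hA : d_ary_max_heapify_go fuel d a i = a := by
      rw [d_ary_max_heapify_go.eq_def]
      dsimp only
      rw [hscan, if_neg (fun hh => hh rfl)]
    have hB : d_ary_max_heapify_alt_go fuel d a i = a := by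
      rw [d_ary_max_heapify_alt_go.eq_def]
      dsimp only
      rw [if_neg hd, hmx]
    rw [hA, hB]

theorem pv_go_eq (fuel : Nat) : ∀ (d : Int) (a : List Int) (i : Int), (0 ≤ i ∨ d ≤ 0) →
    d_ary_max_heapify_go fuel d a i = d_ary_max_heapify_alt_go fuel d a i := by
  induction fuel with
  | zero => intro d a i h; exact pv_go_eq_core 0 d a i h (fun _ _ _ => rfl)
  | succ f ih => intro d a i h; exact pv_go_eq_core (f + 1) d a i h (fun a' j hj => ih d a' j (Or.inl hj))

-- ===== VERDICT (by name: the statement is the Claim_ definition above) =====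
theorem d_ary_max_heapify_spec : Claim_equal_d_ary_max_heapify := by
  intro d a i _ hpre
  unfold Spec_d_ary_max_heapify d_ary_max_heapify d_ary_max_heapify_alt
  exact pv_go_eq (a.length + 1) d a i hpre
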